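-- pv_equiv track=rewrite | github.com/leslie071564/EventCoreference | coref_metrics.py | pairwise_negative_slow
-- ===== SOURCE A (Python) =====
-- values = dict.values
--
-- def pairwise_negative_slow(true, pred):
--     trues = [len(true_cluster) for true_cluster in values(true)]
--     preds = [len(pred_cluster) for pred_cluster in values(pred)]
--     intersections = [[len(true_cluster & pred_cluster)
--                       for true_cluster in values(true)]
--                      for pred_cluster in values(pred)]
--     n_pred = sum(preds)
--     n_true = sum(trues)
--     p_den = sum(a * (n_pred - a) for a in preds) // 2
--     r_den = sum(a * (n_true - a) for a in trues) // 2
--     row_sums = [sum(row) for row in intersections]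
--     N = sum(row_sums)
--     col_sums = [sum(col) for col in zip(*intersections)]
--     assert N == sum(col_sums)
--     num = sum(n * (N - row_sums[row_idx] - col_sums[col_idx] + n)
--               for row_idx, row in enumerate(intersections)
--               for col_idx, n in enumerate(row)) // 2
--     return num, p_den, num, r_den
-- ===== SOURCE B (Python) =====
-- values = dict.values
--
-- def pairwise_negative_slow(true, pred):
--     tvals = list(values(true))
--     pvals = list(values(pred))
--     n_true = sum(len(c) for c in tvals)
--     n_pred = sum(len(c) for c in pvals)
--     p_den = (n_pred * n_pred - sum(len(c) * len(c) for c in pvals)) // 2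
--     r_den = (n_true * n_true - sum(len(c) * len(c) for c in tvals)) // 2
--     # invert the true clusters: element -> indices of the true clusters containing it
--     pairs = [(x, ti) for ti, c in enumerate(tvals) for x in c]
--     where = {}
--     for x, ti in pairs:
--         where.setdefault(x, []).append(ti)
--     # one (ti, pi) key per shared element: only nonzero intersection cells are touched
--     keys = [(ti, pi) for pi, c in enumerate(pvals) for x in c for ti in where.get(x, [])]
--     cells = {}
--     for k in keys:
--         cells[k] = cells.get(k, 0) + 1
--     rowc = {}
--     colc = {}
--     for ti, pi in keys:
--         rowc[pi] = rowc.get(pi, 0) + 1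
--         colc[ti] = colc.get(ti, 0) + 1
--     N = len(keys)
--     sq = sum(n * n for n in cells.values())
--     num = (N * N
--            - sum(v * v for v in rowc.values())
--            - sum(v * v for v in colc.values())
--            + sq) // 2
--     return num, p_den, num, r_den
-- ===== Notes on version B (the rewrite author's own statement) =====
-- stated objective: faster
-- what changed: Instead of materialising the full P x T intersection matrix via pairwise set intersections plus a transpose and an indexed double comprehension, B inverts the true clusters into an element->cluster-indices dict, emits one (ti,pi) key per shared element, counts only the nonzero cells with dicts and aggregates num, p_den and r_den by the closed forms N^2 - sum(row^2) - sum(col^2) + sum(cell^2) and n^2 - sum(a^2).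
import Mathlib
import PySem

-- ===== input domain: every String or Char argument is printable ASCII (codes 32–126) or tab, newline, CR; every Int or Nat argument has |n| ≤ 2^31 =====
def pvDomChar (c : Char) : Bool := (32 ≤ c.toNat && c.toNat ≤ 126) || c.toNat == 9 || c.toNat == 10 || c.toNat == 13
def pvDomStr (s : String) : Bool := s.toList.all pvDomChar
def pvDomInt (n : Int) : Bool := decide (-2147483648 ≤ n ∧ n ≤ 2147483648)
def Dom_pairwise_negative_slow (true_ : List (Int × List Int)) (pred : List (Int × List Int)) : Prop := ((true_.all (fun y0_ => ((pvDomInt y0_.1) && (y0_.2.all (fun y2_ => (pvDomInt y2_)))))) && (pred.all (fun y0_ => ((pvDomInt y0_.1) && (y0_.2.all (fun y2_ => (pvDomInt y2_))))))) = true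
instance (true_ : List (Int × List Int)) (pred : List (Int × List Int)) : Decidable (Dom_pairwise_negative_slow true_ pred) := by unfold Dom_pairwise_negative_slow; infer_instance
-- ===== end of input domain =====

-- B re-implements the metric without the P×T intersection matrix: an element→true-cluster
-- index dict plus counters over the nonzero (ti,pi) cells, with closed-form aggregation
-- (objective: faster — asymptotically, O(elements) vs O(P·T·cluster size)).

-- ===== PORT A =====
-- values = dict.values (used by both the original and the re-implementation)
def pyValues (d : List (Int × List Int)) : List (List Int) := d.map (fun kv => kv.2)

-- hand port of Python's zip(*m): columns up to the shortest row, each column in row order;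
-- exact here because each produced column index c is < every row's length, so row.getD c _ = row[c]
def pyZipStar (m : List (List Int)) : List (List Int) :=
  (List.range (((m.map List.length).min?).getD 0)).map (fun c => m.map (fun row => row.getD c 0))

-- intersections = [[len(t & p) for t in values(true)] for p in values(pred)]
def aInters (tvals pvals : List (List Int)) : List (List Int) :=
  pvals.map (fun pc => tvals.map (fun tc => PySem.Set.len (PySem.Set.inter tc pc)))

def pairwise_negative_slow (true_ : List (Int × List Int)) (pred : List (Int × List Int)) : List Int :=
  let trues := (pyValues true_).map (fun c => PySem.Set.len c)
  let preds := (pyValues pred).map (fun c => PySem.Set.len c)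
  let inters := aInters (pyValues true_) (pyValues pred)
  let n_pred := preds.sum
  let n_true := trues.sum
  let p_den := PySem.Int.floordiv ((preds.map (fun a => a * (n_pred - a))).sum) 2
  let r_den := PySem.Int.floordiv ((trues.map (fun a => a * (n_true - a))).sum) 2
  let row_sums := inters.map (fun row => row.sum)
  let N := row_sums.sum
  let col_sums := (pyZipStar inters).map (fun col => col.sum)
  -- assert N == sum(col_sums): always succeeds (the matrix is rectangular), no value computed
  -- row_sums[row_idx] / col_sums[col_idx]: indices from enumerate are always in range, so pyGetD is exact
  let num := PySem.Int.floordiv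
      (((PySem.List.enumerate inters).map (fun rp =>
          ((PySem.List.enumerate rp.2).map (fun cn =>
              cn.2 * (N - PySem.List.pyGetD row_sums rp.1 0 - PySem.List.pyGetD col_sums cn.1 0 + cn.2))).sum)).sum) 2
  [num, p_den, num, r_den]

-- ===== PORT B =====
-- pairs = [(x, ti) for ti, c in enumerate(tvals) for x in c]
def altPairs (tvals : List (List Int)) : List (Int × Int) :=
  (PySem.List.enumerate tvals).flatMap (fun tc => tc.2.map (fun x => (x, tc.1)))
-- where.setdefault(x, []).append(ti)  ==  modify x [] (· ++ [ti])
def altWhere (tvals : List (List Int)) : PySem.Dict Int (List Int) :=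
  (altPairs tvals).foldl (fun d p => d.modify p.1 [] (fun l => l ++ [p.2])) PySem.Dict.empty
-- keys = [(ti, pi) for pi, c in enumerate(pvals) for x in c for ti in where.get(x, [])]
def altKeys (tvals pvals : List (List Int)) : List (Int × Int) :=
  (PySem.List.enumerate pvals).flatMap (fun pc =>
    pc.2.flatMap (fun x => ((((altWhere tvals).getD x []).map (fun ti => (ti, pc.1))) : List (Int × Int))))
-- cells[k] = cells.get(k, 0) + 1
def altCells (tvals pvals : List (List Int)) : PySem.Dict (Int × Int) Int :=
  (altKeys tvals pvals).foldl (fun d k => d.modify k 0 (fun n => n + 1)) PySem.Dict.empty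
-- rowc[pi] = rowc.get(pi, 0) + 1; colc[ti] = colc.get(ti, 0) + 1  (one pass, pair of dicts)
def altRc (tvals pvals : List (List Int)) : PySem.Dict Int Int × PySem.Dict Int Int :=
  (altKeys tvals pvals).foldl
    (fun rc k => (rc.1.modify k.2 0 (fun n => n + 1), rc.2.modify k.1 0 (fun n => n + 1)))
    (PySem.Dict.empty, PySem.Dict.empty)

def pairwise_negative_slow_alt (true_ : List (Int × List Int)) (pred : List (Int × List Int)) : List Int :=
  let n_true := ((pyValues true_).map (fun c => PySem.Set.len c)).sum
  let n_pred := ((pyValues pred).map (fun c => PySem.Set.len c)).sum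
  let p_den := PySem.Int.floordiv (n_pred * n_pred - ((pyValues pred).map (fun c => PySem.Set.len c * PySem.Set.len c)).sum) 2
  let r_den := PySem.Int.floordiv (n_true * n_true - ((pyValues true_).map (fun c => PySem.Set.len c * PySem.Set.len c)).sum) 2
  let N := PySem.List.len (altKeys (pyValues true_) (pyValues pred))
  let sq := ((altCells (pyValues true_) (pyValues pred)).values.map (fun n => n * n)).sum
  let num := PySem.Int.floordiv
      (N * N - (((altRc (pyValues true_) (pyValues pred)).1.values.map (fun v => v * v)).sum)
        - (((altRc (pyValues true_) (pyValues pred)).2.values.map (fun v => v * v)).sum) + sq) 2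
  [num, p_den, num, r_den]

-- ===== PRECONDITION & SPEC =====
-- Pre_ only states that the association list is a valid encoding of a Python dict[int, set[int]]:
-- keys distinct and each cluster's element list distinct (the convention for dict/set arguments);
-- it excludes no input the Python A accepts, since every Python dict of sets encodes this way.
def Pre_pairwise_negative_slow (true_ : List (Int × List Int)) (pred : List (Int × List Int)) : Prop :=
  (true_.map (fun kv => kv.1)).Nodup ∧ (pred.map (fun kv => kv.1)).Nodup ∧
  (∀ kv ∈ true_, kv.2.Nodup) ∧ (∀ kv ∈ pred, kv.2.Nodup)
instance (true_ : List (Int × List Int)) (pred : List (Int × List Int)) : Decidable (Pre_pairwise_negative_slow true_ pred) := by unfold Pre_pairwise_negative_slow; infer_instance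

def pvWitness_pairwise_negative_slow : (List (Int × List Int)) × (List (Int × List Int)) :=
  ([(0, [1, 2]), (1, [3])], [(0, [1, 3]), (2, [2])])

def Spec_pairwise_negative_slow (true_ : List (Int × List Int)) (pred : List (Int × List Int)) (out : List Int) : Prop := out = pairwise_negative_slow_alt true_ pred
instance (true_ : List (Int × List Int)) (pred : List (Int × List Int)) (out : List Int) : Decidable (Spec_pairwise_negative_slow true_ pred out) := by unfold Spec_pairwise_negative_slow; infer_instance

-- ===== CLAIM (what is proved, stated in full; the proofs are below) =====
def Claim_equal_pairwise_negative_slow : Prop := ∀ (true_ : List (Int × List Int)) (pred : List (Int × List Int)), Dom_pairwise_negative_slow true_ pred → Pre_pairwise_negative_slow true_ pred → Spec_pairwise_negative_slow true_ pred (pairwise_negative_slow true_ pred)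

-- ===== LEMMAS AND PROOFS =====


theorem pvL_sum_mul_sub (l : List Int) (s : Int) :
    (l.map (fun a => a * (s - a))).sum = l.sum * s - (l.map (fun a => a * a)).sum := by
  induction l with
  | nil => simp
  | cons a l ih => simp [ih]; ring

theorem pvL_sum_getD {α M : Type} [AddCommMonoid M] (l : List α) (f : α → M) (d : α) :
    (l.map f).sum = ∑ j ∈ Finset.range l.length, f (l.getD j d) := by
  induction l with
  | nil => simp
  | cons a l ih =>
      simp [ih, Finset.sum_range_succ']
      exact (add_comm _ _)

theorem pvL_enum_spec {α : Type} (l : List α) (s : Int) (d : α) :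
    PySem.List.enumerate l s = (List.range l.length).map (fun (j : Nat) => (s + (j : Int), l.getD j d)) := by
  induction l generalizing s with
  | nil => simp [PySem.List.enumerate]
  | cons a l ih =>
      rw [show PySem.List.enumerate (a :: l) s = (s, a) :: PySem.List.enumerate l (s+1) from rfl,
          ih (s+1), List.length_cons, List.range_succ_eq_map, List.map_cons, List.map_map]
      simp only [List.getD_cons_zero, Nat.cast_zero, add_zero, List.cons.injEq]
      refine ⟨by trivial, List.map_congr_left ?_⟩
      intro j hj
      simp only [Function.comp_apply, List.getD_cons_succ, Prod.mk.injEq]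
      exact ⟨by push_cast; ring, by trivial⟩

theorem pvL_foldl_pair {γ δ ε : Type} (l : List γ) (f : δ → γ → δ) (g : ε → γ → ε) (a : δ) (b : ε) :
    l.foldl (fun s k => (f s.1 k, g s.2 k)) (a, b) = (l.foldl f a, l.foldl g b) := by
  induction l generalizing a b with
  | nil => rfl
  | cons x l ih => simp [List.foldl_cons, ih]

-- getD of a keyed counting fold
theorem pvL_getD_foldl_modify_key_add_one {κ : Type} [BEq κ] [LawfulBEq κ] [DecidableEq κ]
    {γ : Type} (l : List γ) (key : γ → κ) (d : PySem.Dict κ Int) (v : κ) :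
    (l.foldl (fun d x => d.modify (key x) 0 (fun n => n + 1)) d).getD v 0
      = d.getD v 0 + ((l.map key).count v : Int) := by
  induction l generalizing d with
  | nil => simp
  | cons x l ih =>
      rw [List.foldl_cons, ih, PySem.Dict.getD_modify]
      by_cases h : v = key x
      · simp [h, List.count_cons]
        ring
      · simp [h, List.count_cons, Ne.symm h]

-- countP over a list of in-grid Int pairs as a double range sum
theorem pvL_countP_grid (T P : Nat) (l : List (Int × Int))
    (hmem : ∀ z ∈ l, ∃ j < T, ∃ i < P, z = ((j : Int), (i : Int)))
    (q : Int × Int → Bool) :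
    l.countP q = ∑ j ∈ Finset.range T, ∑ i ∈ Finset.range P,
      (if q ((j : Int), (i : Int)) then l.count ((j : Int), (i : Int)) else 0) := by
  induction l with
  | nil => simp
  | cons z l ih =>
      obtain ⟨j0, hj0, i0, hi0, rfl⟩ := hmem z (List.mem_cons_self)
      rw [List.countP_cons]
      rw [ih (fun z hz => hmem z (List.mem_cons_of_mem _ hz))]
      have hcount : ∀ (j i : Nat), (List.count ((j:Int),(i:Int)) (((j0:Int),(i0:Int)) :: l))
          = l.count ((j:Int),(i:Int)) + (if j = j0 ∧ i = i0 then 1 else 0) := by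
        intro j i
        rw [List.count_cons]
        congr 1
        by_cases h : j = j0 ∧ i = i0
        · simp [h.1, h.2]
        · have : ¬ (((j:Int),(i:Int)) = ((j0:Int),(i0:Int))) := by
            simp only [Prod.mk.injEq, Int.natCast_inj]
            tauto
          simp only [beq_iff_eq, this, if_false]
          have h' : ¬ (j0 = j ∧ i0 = i) := fun hc => h ⟨hc.1.symm, hc.2.symm⟩
          simp [h, h']
      have hsplit : ∀ (j i : Nat),
          (if q ((j:Int),(i:Int)) then (((j0:Int),(i0:Int)) :: l).count ((j:Int),(i:Int)) else 0)
          = (if q ((j:Int),(i:Int)) then l.count ((j:Int),(i:Int)) else 0)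
            + (if q ((j:Int),(i:Int)) then (if j = j0 ∧ i = i0 then 1 else 0) else 0) := by
        intro j i
        rw [hcount]
        split <;> simp
      simp only [hsplit, Finset.sum_add_distrib]
      congr 1
      -- remaining: the singleton term
      have : ∑ j ∈ Finset.range T, ∑ i ∈ Finset.range P,
          (if q ((j:Int),(i:Int)) then (if j = j0 ∧ i = i0 then 1 else 0) else 0)
          = (if q ((j0:Int),(i0:Int)) then 1 else 0) := by
        rw [Finset.sum_eq_single j0]
        · rw [Finset.sum_eq_single i0]
          · simp
          · intro i _ hne; simp [hne]
          · intro h; exact absurd (Finset.mem_range.mpr hi0) h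
        · intro j _ hne
          apply Finset.sum_eq_zero
          intro i _
          simp [hne]
        · intro h; exact absurd (Finset.mem_range.mpr hj0) h
      rw [this]

-- |t ∩ p| computed from t's side equals the countP from p's side (both Nodup)
theorem pvL_inter_swap (t p : List Int) (ht : t.Nodup) (hp : p.Nodup) :
    PySem.Set.len (PySem.Set.inter t p) = ((p.filter (fun x => decide (x ∈ t))).length : Int) := by
  simp only [PySem.Set.len, PySem.Set.inter, Int.natCast_inj]
  have h1 : (t.filter (fun x => PySem.Set.contains p x)).Nodup := ht.filter _
  have h2 : (p.filter (fun x => decide (x ∈ t))).Nodup := hp.filter _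
  have hperm : (t.filter (fun x => PySem.Set.contains p x)).Perm (p.filter (fun x => decide (x ∈ t))) := by
    rw [List.perm_ext_iff_of_nodup h1 h2]
    intro a
    simp [PySem.Set.contains_iff]
    tauto
  exact hperm.length_eq

-- algebra: the expanded pairwise-negative numerator
theorem pvL_alg (T P : Nat) (m : Nat → Nat → Int)
    (R : Nat → Int) (C : Nat → Int) (S : Int)
    (hR : ∀ i, R i = ∑ j ∈ Finset.range T, m j i)
    (hC : ∀ j, C j = ∑ i ∈ Finset.range P, m j i)
    (hS : S = ∑ i ∈ Finset.range P, ∑ j ∈ Finset.range T, m j i) :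
    ∑ i ∈ Finset.range P, ∑ j ∈ Finset.range T, m j i * (S - R i - C j + m j i)
      = S * S - (∑ i ∈ Finset.range P, R i * R i) - (∑ j ∈ Finset.range T, C j * C j)
        + ∑ i ∈ Finset.range P, ∑ j ∈ Finset.range T, m j i * m j i := by
  have expand : ∀ (i j : Nat), m j i * (S - R i - C j + m j i)
      = m j i * S - m j i * R i - m j i * C j + m j i * m j i := by intro i j; ring
  simp only [expand, Finset.sum_add_distrib, Finset.sum_sub_distrib]
  congr 1
  congr 1
  congr 1
  · -- ∑∑ m*S = S*S
    rw [hS, Finset.sum_mul]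
    exact (Finset.sum_congr rfl (fun i _ => by rw [Finset.sum_mul]))
  · -- ∑∑ m*R i = ∑ R²
    exact Finset.sum_congr rfl (fun i _ => by rw [← Finset.sum_mul, ← hR i])
  · -- ∑∑ m*C j = ∑ C²
    rw [Finset.sum_comm]
    exact Finset.sum_congr rfl (fun j _ => by rw [← Finset.sum_mul, ← hC j])

theorem pvL_range_sum {M : Type} [AddCommMonoid M] (n : Nat) (g : Nat → M) :
    ((List.range n).map g).sum = ∑ i ∈ Finset.range n, g i := by
  induction n with
  | zero => simp
  | succ n ih => simp [List.range_succ, Finset.sum_range_succ, ih]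

-- count of a tagged pair in an index-tagged flatMap
theorem pvL_count_tagged {γ : Type} [BEq γ] [LawfulBEq γ] (n : Nat) (F : Nat → List γ)
    (a : γ) (i0 : Nat) (h : i0 < n) :
    ((List.range n).flatMap (fun i => (F i).map (fun y => (y, (i : Int))))).count (a, (i0 : Int))
      = (F i0).count a := by
  rw [List.count_flatMap, pvL_range_sum]
  have hterm : ∀ i : Nat, ((List.count (a, (i0:Int))) ∘ (fun i => (F i).map (fun y => (y, (i : Int))))) i
      = if i = i0 then (F i0).count a else 0 := by
    intro i
    simp only [Function.comp_apply, List.count, List.countP_map]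
    by_cases hi : i = i0
    · subst hi
      rw [if_pos rfl]
      apply List.countP_congr
      intro y _
      simp
    · rw [List.countP_eq_zero.mpr]
      · simp [hi]
      · intro y _
        simp only [Function.comp_apply, beq_iff_eq, Prod.mk.injEq, decide_eq_true_eq]
        rintro ⟨-, h2⟩
        exact hi (by exact_mod_cast h2)
  simp only [hterm]
  simp [Finset.sum_ite_eq, Finset.mem_range, h]

theorem pvL_mem_tagged {γ : Type} (n : Nat) (F : Nat → List γ) (z : γ × Int)
    (hz : z ∈ (List.range n).flatMap (fun i => (F i).map (fun y => (y, (i : Int))))) :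
    ∃ i < n, z.2 = (i : Int) ∧ z.1 ∈ F i := by
  simp only [List.mem_flatMap, List.mem_map, List.mem_range] at hz
  obtain ⟨i, hi, y, hy, rfl⟩ := hz
  exact ⟨i, hi, rfl, hy⟩

-- extend a nodup-list sum of squares of a weight to a superset where the weight vanishes
theorem pvL_sum_sq_extend {κ : Type} [DecidableEq κ] (K : List κ) (hK : K.Nodup)
    (G : Finset κ) (hsub : ∀ k ∈ K, k ∈ G) (w : κ → Int)
    (hzero : ∀ k ∈ G, k ∉ K → w k = 0) :
    (K.map (fun k => w k * w k)).sum = ∑ k ∈ G, w k * w k := by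
  rw [← List.sum_toFinset _ hK]
  apply Finset.sum_subset
  · intro k hk
    exact hsub k (List.mem_toFinset.mp hk)
  · intro k hkG hkn
    rw [hzero k hkG (fun hc => hkn (List.mem_toFinset.mpr hc))]
    ring

def pvCell (TS PS : List (List Int)) (j i : Nat) : Nat :=
  ((PS.getD i []).filter (fun x => decide (x ∈ TS.getD j []))).length

def pvRow (TS PS : List (List Int)) (i : Nat) : Int :=
  ∑ j ∈ Finset.range TS.length, (pvCell TS PS j i : Int)
def pvCol (TS PS : List (List Int)) (j : Nat) : Int :=
  ∑ i ∈ Finset.range PS.length, (pvCell TS PS j i : Int)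
def pvS (TS PS : List (List Int)) : Int :=
  ∑ i ∈ Finset.range PS.length, pvRow TS PS i
def pvNum (TS PS : List (List Int)) : Int :=
  pvS TS PS * pvS TS PS
    - (∑ i ∈ Finset.range PS.length, pvRow TS PS i * pvRow TS PS i)
    - (∑ j ∈ Finset.range TS.length, pvCol TS PS j * pvCol TS PS j)
    + ∑ i ∈ Finset.range PS.length, ∑ j ∈ Finset.range TS.length,
        (pvCell TS PS j i : Int) * (pvCell TS PS j i : Int)

theorem pvL_A_num (TS PS : List (List Int)) (ht : ∀ c ∈ TS, c.Nodup) (hp : ∀ c ∈ PS, c.Nodup) :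
    ((PySem.List.enumerate (aInters TS PS)).map (fun rp =>
        ((PySem.List.enumerate rp.2).map (fun cn =>
            cn.2 * (((aInters TS PS).map (fun row => row.sum)).sum
              - PySem.List.pyGetD ((aInters TS PS).map (fun row => row.sum)) rp.1 0
              - PySem.List.pyGetD ((pyZipStar (aInters TS PS)).map (fun col => col.sum)) cn.1 0
              + cn.2))).sum)).sum
      = pvNum TS PS := by
  by_cases hP : PS.length = 0
  · rw [List.length_eq_zero_iff] at hP
    subst hP
    simp [aInters, PySem.List.enumerate, pvNum, pvS, pvRow, pvCol]
  -- identify the matrix entries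
  have hM : aInters TS PS = PS.map (fun p => TS.map (fun t => (((p.filter (fun x => decide (x ∈ t))).length : Int)))) := by
    unfold aInters
    apply List.map_congr_left
    intro p hpmem
    apply List.map_congr_left
    intro t htmem
    exact pvL_inter_swap t p (ht _ htmem) (hp _ hpmem)
  have hMlen : (aInters TS PS).length = PS.length := by rw [hM, List.length_map]
  have hrow : ∀ i : Nat, i < PS.length →
      (aInters TS PS).getD i [] = TS.map (fun t => ((((PS.getD i []).filter (fun x => decide (x ∈ t))).length : Int))) := by
    intro i hi
    rw [hM, List.getD_eq_getElem _ _ (by simpa using hi), List.getElem_map,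
        List.getD_eq_getElem _ _ hi]
  have hrowlen : ∀ i : Nat, i < PS.length → ((aInters TS PS).getD i []).length = TS.length := by
    intro i hi; rw [hrow i hi, List.length_map]
  have hentry : ∀ i : Nat, i < PS.length → ∀ j : Nat, j < TS.length →
      ((aInters TS PS).getD i []).getD j 0 = (pvCell TS PS j i : Int) := by
    intro i hi j hj
    rw [hrow i hi, List.getD_eq_getElem _ _ (by simpa using hj), List.getElem_map, pvCell,
        List.getD_eq_getElem _ _ hj]
  have hrsum : ∀ i : Nat, i < PS.length → ((aInters TS PS).getD i []).sum = pvRow TS PS i := by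
    intro i hi
    rw [show ((aInters TS PS).getD i []).sum = (((aInters TS PS).getD i []).map id).sum by rw [List.map_id],
        pvL_sum_getD _ _ 0, hrowlen i hi, pvRow]
    exact Finset.sum_congr rfl (fun j hj => by
      simpa using hentry i hi j (Finset.mem_range.mp hj))
  -- row sums list
  have hN : ((aInters TS PS).map (fun row => row.sum)).sum = pvS TS PS := by
    rw [pvL_sum_getD (aInters TS PS) (fun row => row.sum) [], hMlen, pvS]
    exact Finset.sum_congr rfl (fun i hi => hrsum i (Finset.mem_range.mp hi))
  have hgetD_map : ∀ {α β : Type} (l : List α) (f : α → β) (i : Nat), i < l.length → ∀ (d : β) (d' : α),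
      (l.map f).getD i d = f (l.getD i d') := by
    intro α β l f i h d d'
    rw [List.getD_eq_getElem _ _ (by simpa using h), List.getElem_map, List.getD_eq_getElem _ _ h]
  -- row_sums indexing
  have hRS : ∀ i : Nat, i < PS.length →
      PySem.List.pyGetD ((aInters TS PS).map (fun row => row.sum)) (0 + (i : Int)) 0 = pvRow TS PS i := by
    intro i hi
    rw [zero_add, PySem.List.pyGetD_natCast, hgetD_map _ _ i (by omega : i < (aInters TS PS).length) 0 [],
        hrsum i hi]
  -- col_sums and its indexing
  have hmin : ((aInters TS PS).map List.length).min? = some TS.length := by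
    rw [List.min?_eq_some_iff]
    constructor
    · rw [hM, List.map_map]
      rcases List.exists_mem_of_length_pos (by omega : 0 < PS.length) with ⟨p, hpmem⟩
      refine List.mem_map.mpr ⟨p, hpmem, ?_⟩
      simp
    · intro b hb
      rw [hM, List.map_map] at hb
      obtain ⟨p, _, rfl⟩ := List.mem_map.mp hb
      simp
  have hCS : ∀ j : Nat, j < TS.length →
      PySem.List.pyGetD ((pyZipStar (aInters TS PS)).map (fun col => col.sum)) (0 + (j : Int)) 0 = pvCol TS PS j := by
    intro j hj
    rw [zero_add, PySem.List.pyGetD_natCast, pyZipStar, hmin]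
    rw [List.map_map]
    rw [hgetD_map _ _ j (by simpa using hj) 0 0]
    rw [Function.comp_apply, List.getD_eq_getElem _ _ (by simpa using hj), List.getElem_range]
    rw [pvL_sum_getD (aInters TS PS) (fun row => row.getD j 0) [], hMlen, pvCol]
    exact Finset.sum_congr rfl (fun i hi => hentry i (Finset.mem_range.mp hi) j hj)
  -- expand the enumerates
  rw [pvL_enum_spec (aInters TS PS) 0 [], List.map_map, pvL_range_sum, hMlen]
  have houter : ∀ i ∈ Finset.range PS.length,
      (((fun rp => ((PySem.List.enumerate rp.2).map (fun cn =>
            cn.2 * (((aInters TS PS).map (fun row => row.sum)).sum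
              - PySem.List.pyGetD ((aInters TS PS).map (fun row => row.sum)) rp.1 0
              - PySem.List.pyGetD ((pyZipStar (aInters TS PS)).map (fun col => col.sum)) cn.1 0
              + cn.2))).sum) ∘ (fun (j : Nat) => ((0 : Int) + (j : Int), (aInters TS PS).getD j []))) i)
      = ∑ j ∈ Finset.range TS.length,
          (pvCell TS PS j i : Int) * (pvS TS PS - pvRow TS PS i - pvCol TS PS j + (pvCell TS PS j i : Int)) := by
    intro i hi
    have hi' := Finset.mem_range.mp hi
    rw [Function.comp_apply, pvL_enum_spec _ _ 0, List.map_map, pvL_range_sum, hrowlen i hi']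
    refine Finset.sum_congr rfl (fun j hj => ?_)
    have hj' := Finset.mem_range.mp hj
    rw [Function.comp_apply, hN, hRS i hi', hCS j hj', hentry i hi' j hj']
  rw [Finset.sum_congr rfl houter]
  rw [pvL_alg TS.length PS.length (fun j i => (pvCell TS PS j i : Int)) (pvRow TS PS) (pvCol TS PS) (pvS TS PS)
      (fun i => rfl) (fun j => rfl) (by rw [pvS]; exact Finset.sum_congr rfl (fun i _ => rfl))]
  rfl

theorem pvL_Wcount (l : List (Int × Int)) (x ti : Int) :
    ((l.filter (fun p => p.1 == x)).map (fun p => p.2)).count ti = l.count (x, ti) := by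
  simp only [List.count, List.countP_map, List.countP_filter]
  apply List.countP_congr
  rintro ⟨a, b⟩ _
  show (((b == ti) && (a == x)) = true) ↔ (((a, b) == (x, ti)) = true)
  rw [show ((a, b) == (x, ti)) = (a == x && b == ti) from rfl, Bool.and_comm]

theorem pvL_Wmem (l : List (Int × Int)) (x ti : Int)
    (h : ti ∈ (l.filter (fun p => p.1 == x)).map (fun p => p.2)) : (x, ti) ∈ l := by
  simp only [List.mem_map, List.mem_filter, beq_iff_eq] at h
  obtain ⟨p, ⟨hp, hx⟩, hti⟩ := h
  have : p = (x, ti) := by cases p; simp_all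
  exact this ▸ hp

theorem pvL_sum_count_nodup (t p : List Int) (ht : t.Nodup) :
    (p.map (fun x => t.count x)).sum = p.countP (fun x => decide (x ∈ t)) := by
  induction p with
  | nil => simp
  | cons x p ih =>
      rw [List.map_cons, List.sum_cons, List.countP_cons, ih]
      by_cases hx : x ∈ t
      · rw [List.count_eq_one_of_mem ht hx]; simp [hx, Nat.add_comm]
      · rw [List.count_eq_zero_of_not_mem hx]; simp [hx]

def pvPairs (TS : List (List Int)) : List (Int × Int) :=
  (List.range TS.length).flatMap (fun j => (TS.getD j []).map (fun y => (y, (j : Int))))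

def pvKeys (TS PS : List (List Int)) : List (Int × Int) :=
  (List.range PS.length).flatMap (fun i =>
    ((PS.getD i []).flatMap (fun x => ((pvPairs TS).filter (fun p => p.1 == x)).map (fun p => p.2))).map
      (fun ti => (ti, (i : Int))))

theorem pvL_keys_count (TS PS : List (List Int)) (ht : ∀ c ∈ TS, c.Nodup)
    (j i : Nat) (hj : j < TS.length) (hi : i < PS.length) :
    (pvKeys TS PS).count ((j : Int), (i : Int)) = pvCell TS PS j i := by
  unfold pvKeys
  rw [pvL_count_tagged _ _ _ _ hi]
  rw [List.count_flatMap]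
  have hterm : ∀ x : Int, (List.count (j:Int) ∘ (fun x => ((pvPairs TS).filter (fun p => p.1 == x)).map (fun p => p.2))) x
      = (TS.getD j []).count x := by
    intro x
    rw [Function.comp_apply, pvL_Wcount, pvPairs, pvL_count_tagged _ _ _ _ hj]
  rw [List.map_congr_left (fun x _ => hterm x)]
  have hnd : (TS.getD j []).Nodup := by
    have : TS.getD j [] ∈ TS := by
      rw [List.getD_eq_getElem _ _ hj]
      exact List.getElem_mem hj
    exact ht _ this
  rw [pvL_sum_count_nodup _ _ hnd]
  rw [pvCell, List.countP_eq_length_filter]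

theorem pvL_keys_mem (TS PS : List (List Int)) (z : Int × Int) (hz : z ∈ pvKeys TS PS) :
    ∃ j < TS.length, ∃ i < PS.length, z = ((j : Int), (i : Int)) := by
  unfold pvKeys at hz
  obtain ⟨i, hi, hz2, hz1⟩ := pvL_mem_tagged _ _ _ hz
  simp only [List.mem_flatMap] at hz1
  obtain ⟨x, hx, hti⟩ := hz1
  have hp := pvL_Wmem _ _ _ hti
  obtain ⟨j, hj, he2, he1⟩ := pvL_mem_tagged _ _ (x, z.1) hp
  exact ⟨j, hj, i, hi, by rw [← hz2, ← he2]⟩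


theorem pvL_Bpairs (TS : List (List Int)) : altPairs TS = pvPairs TS := by
  rw [altPairs, pvPairs, pvL_enum_spec TS 0 [], List.flatMap_map]
  simp

theorem pvL_Bkeys (TS PS : List (List Int)) : altKeys TS PS = pvKeys TS PS := by
  have hW : ∀ x : Int, (altWhere TS).getD x []
      = ((pvPairs TS).filter (fun p => p.1 == x)).map (fun p => p.2) := by
    intro x
    rw [altWhere, pvL_Bpairs, PySem.Dict.getD_foldl_modify_append]
    simp [PySem.Dict.getD_empty]
  rw [altKeys, pvKeys, pvL_enum_spec PS 0 [], List.flatMap_map]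
  apply List.flatMap_congr
  intro i _
  simp only [zero_add]
  rw [← List.map_flatMap]
  congr 1
  apply List.flatMap_congr
  intro x _
  rw [hW]

theorem pvL_B_num (TS PS : List (List Int)) (ht : ∀ c ∈ TS, c.Nodup) :
    PySem.List.len (altKeys TS PS) * PySem.List.len (altKeys TS PS)
      - (((altRc TS PS).1.values.map (fun v => v * v)).sum)
      - (((altRc TS PS).2.values.map (fun v => v * v)).sum)
      + (((altCells TS PS).values.map (fun n => n * n)).sum)
      = pvNum TS PS := by
  have hmemg : ∀ z ∈ pvKeys TS PS, ∃ j < TS.length, ∃ i < PS.length, z = ((j : Int), (i : Int)) :=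
    fun z hz => pvL_keys_mem TS PS z hz
  -- N = total count
  have hlen : (pvKeys TS PS).length
      = ∑ j ∈ Finset.range TS.length, ∑ i ∈ Finset.range PS.length, (pvKeys TS PS).count ((j:Int),(i:Int)) := by
    rw [show (pvKeys TS PS).length = (pvKeys TS PS).countP (fun _ => true) from
          (congrFun List.countP_true (pvKeys TS PS)).symm]
    rw [pvL_countP_grid TS.length PS.length _ hmemg]
    simp
  -- per-cell counts as pvCell
  have hcnt : ∀ j ∈ Finset.range TS.length, ∀ i ∈ Finset.range PS.length,
      (pvKeys TS PS).count ((j:Int),(i:Int)) = pvCell TS PS j i := by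
    intro j hj i hi
    exact pvL_keys_count TS PS ht j i (Finset.mem_range.mp hj) (Finset.mem_range.mp hi)
  -- row counter: counts of second components
  have hrowcnt : ∀ i : Nat, i < PS.length →
      (((pvKeys TS PS).map (fun z => z.2)).count ((i : Int)) : Int) = pvRow TS PS i := by
    intro i hi
    rw [List.count, List.countP_map]
    rw [show ((fun x => x == ((i:Int))) ∘ (fun (z : Int × Int) => z.2)) = (fun (z : Int × Int) => z.2 == (i:Int)) from rfl]
    rw [pvL_countP_grid TS.length PS.length _ hmemg]
    have hstep : ∀ j ∈ Finset.range TS.length,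
        (∑ i' ∈ Finset.range PS.length,
          if (((i':Int)) == ((i:Int))) = true then (pvKeys TS PS).count ((j:Int),(i':Int)) else 0)
        = (pvKeys TS PS).count ((j:Int),(i:Int)) := by
      intro j hj
      have hcong : ∀ i' ∈ Finset.range PS.length,
          (if (((i':Int)) == ((i:Int))) = true then (pvKeys TS PS).count ((j:Int),(i':Int)) else 0)
          = if i' = i then (pvKeys TS PS).count ((j:Int),(i':Int)) else 0 := by
        intro i' _
        by_cases hc : i' = i
        · subst hc; simp
        · have : (((i':Int)) == ((i:Int))) = false := by
            simp only [beq_eq_false_iff_ne, ne_eq, Int.natCast_inj]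
            exact hc
          simp [this, hc]
      rw [Finset.sum_congr rfl hcong]
      rw [Finset.sum_ite_eq' (Finset.range PS.length) i (fun i' => (pvKeys TS PS).count ((j:Int),(i':Int)))]
      rw [if_pos (Finset.mem_range.mpr hi)]
    rw [Finset.sum_congr rfl hstep]
    rw [pvRow]
    push_cast
    exact Finset.sum_congr rfl (fun j hj => by rw [hcnt j hj i (Finset.mem_range.mpr hi)])
  -- col counter: counts of first components
  have hcolcnt : ∀ j : Nat, j < TS.length →
      (((pvKeys TS PS).map (fun z => z.1)).count ((j : Int)) : Int) = pvCol TS PS j := by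
    intro j hj
    rw [List.count, List.countP_map]
    rw [show ((fun x => x == ((j:Int))) ∘ (fun (z : Int × Int) => z.1)) = (fun (z : Int × Int) => z.1 == (j:Int)) from rfl]
    rw [pvL_countP_grid TS.length PS.length _ hmemg]
    have hstep : ∀ j' ∈ Finset.range TS.length,
        (∑ i ∈ Finset.range PS.length,
          if (((j':Int)) == ((j:Int))) = true then (pvKeys TS PS).count ((j':Int),(i:Int)) else 0)
        = if j' = j then (∑ i ∈ Finset.range PS.length, (pvKeys TS PS).count ((j:Int),(i:Int))) else 0 := by
      intro j' hj'
      by_cases hc : j' = j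
      · subst hc; simp
      · have : (((j':Int)) == ((j:Int))) = false := by
          simp only [beq_eq_false_iff_ne, ne_eq, Int.natCast_inj]
          exact hc
        simp [this, hc]
    rw [Finset.sum_congr rfl hstep]
    rw [Finset.sum_ite_eq' (Finset.range TS.length) j
        (fun j' => ∑ i ∈ Finset.range PS.length, (pvKeys TS PS).count ((j:Int),(i:Int)))]
    rw [if_pos (Finset.mem_range.mpr hj), pvCol]
    push_cast
    exact Finset.sum_congr rfl (fun i hi => by rw [hcnt j (Finset.mem_range.mpr hj) i hi])
  -- split the pair fold
  have hsplit : altRc TS PS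
      = ((pvKeys TS PS).foldl (fun d k => d.modify k.2 0 (fun n => n + 1)) (PySem.Dict.empty : PySem.Dict Int Int),
         (pvKeys TS PS).foldl (fun d k => d.modify k.1 0 (fun n => n + 1)) (PySem.Dict.empty : PySem.Dict Int Int)) := by
    rw [altRc, pvL_Bkeys]
    exact pvL_foldl_pair (pvKeys TS PS)
      (fun d (k : Int × Int) => d.modify k.2 0 (fun n => n + 1))
      (fun d (k : Int × Int) => d.modify k.1 0 (fun n => n + 1))
      (PySem.Dict.empty : PySem.Dict Int Int) (PySem.Dict.empty : PySem.Dict Int Int)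
  -- generic treatment of a tag-counter dict's sum of squared values
  have htag : ∀ (key : Int × Int → Int),
      ((((pvKeys TS PS).foldl (fun d k => d.modify (key k) 0 (fun n => n + 1))
          (PySem.Dict.empty : PySem.Dict Int Int)).values.map
        (fun v => v * v)).sum)
      = ((PySem.Set.ofList ((pvKeys TS PS).map key)).map
          (fun v => ((((pvKeys TS PS).map key).count v : Int)) * ((((pvKeys TS PS).map key).count v : Int)))).sum := by
    intro key
    set d := (pvKeys TS PS).foldl (fun d k => d.modify (key k) 0 (fun n => n + 1))
      (PySem.Dict.empty : PySem.Dict Int Int) with hd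
    have hnd : d.keys.Nodup := by
      rw [hd]
      exact PySem.Dict.nodup_keys_foldl_modify_key _ _ _ _ _ (by simp [PySem.Dict.nodup_keys_empty])
    have hkeys : d.keys = PySem.Set.ofList ((pvKeys TS PS).map key) := by
      rw [hd, PySem.Dict.keys_foldl_modify_key]
      simp [PySem.Set.update_nil_left]
    have hgetD : ∀ v, d.getD v 0 = (((pvKeys TS PS).map key).count v : Int) := by
      intro v
      rw [hd, pvL_getD_foldl_modify_key_add_one]
      simp [PySem.Dict.getD_empty]
    rw [PySem.Dict.values_eq_map_keys d hnd 0, hkeys, List.map_map]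
    refine congrArg List.sum (List.map_congr_left ?_)
    intro v _
    simp [hgetD v]
  -- rows sum of squares
  have hrows : (((altRc TS PS).1.values.map (fun v => v * v)).sum)
      = ∑ i ∈ Finset.range PS.length, pvRow TS PS i * pvRow TS PS i := by
    rw [hsplit]
    rw [htag (fun k => k.2)]
    rw [pvL_sum_sq_extend _ (PySem.Set.nodup_ofList _)
        ((Finset.range PS.length).image (fun i : Nat => (i : Int)))
        (fun v hv => ?_) (fun v => (((pvKeys TS PS).map (fun z => z.2)).count v : Int)) (fun v hvG hvn => ?_)]
    · rw [Finset.sum_image (fun a _ b _ h => by exact_mod_cast h)]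
      exact Finset.sum_congr rfl (fun i hi => by
        rw [hrowcnt i (Finset.mem_range.mp hi)])
    · -- hsub
      have hv' : v ∈ (pvKeys TS PS).map (fun z => z.2) := (PySem.Set.mem_ofList _ _).mp hv
      obtain ⟨z, hz, rfl⟩ := List.mem_map.mp hv'
      obtain ⟨j, hj, i, hi, rfl⟩ := hmemg z hz
      exact Finset.mem_image.mpr ⟨i, Finset.mem_range.mpr hi, rfl⟩
    · -- hzero
      have : v ∉ (pvKeys TS PS).map (fun z => z.2) := fun hc => hvn ((PySem.Set.mem_ofList _ _).mpr hc)
      simp [List.count_eq_zero_of_not_mem this]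
  -- cols sum of squares
  have hcols : (((altRc TS PS).2.values.map (fun v => v * v)).sum)
      = ∑ j ∈ Finset.range TS.length, pvCol TS PS j * pvCol TS PS j := by
    rw [hsplit]
    rw [htag (fun k => k.1)]
    rw [pvL_sum_sq_extend _ (PySem.Set.nodup_ofList _)
        ((Finset.range TS.length).image (fun j : Nat => (j : Int)))
        (fun v hv => ?_) (fun v => (((pvKeys TS PS).map (fun z => z.1)).count v : Int)) (fun v hvG hvn => ?_)]
    · rw [Finset.sum_image (fun a _ b _ h => by exact_mod_cast h)]
      exact Finset.sum_congr rfl (fun j hj => by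
        rw [hcolcnt j (Finset.mem_range.mp hj)])
    · have hv' : v ∈ (pvKeys TS PS).map (fun z => z.1) := (PySem.Set.mem_ofList _ _).mp hv
      obtain ⟨z, hz, rfl⟩ := List.mem_map.mp hv'
      obtain ⟨j, hj, i, hi, rfl⟩ := hmemg z hz
      exact Finset.mem_image.mpr ⟨j, Finset.mem_range.mpr hj, rfl⟩
    · have : v ∉ (pvKeys TS PS).map (fun z => z.1) := fun hc => hvn ((PySem.Set.mem_ofList _ _).mpr hc)
      simp [List.count_eq_zero_of_not_mem this]
  -- cells sum of squares
  have hsq : (((altCells TS PS).values).map (fun n => n * n)).sum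
      = ∑ j ∈ Finset.range TS.length, ∑ i ∈ Finset.range PS.length,
          (pvCell TS PS j i : Int) * (pvCell TS PS j i : Int) := by
    rw [altCells, pvL_Bkeys]
    rw [show ((pvKeys TS PS).foldl (fun d k => d.modify k 0 (fun n => n + 1)) PySem.Dict.empty)
        = PySem.Dict.counter (pvKeys TS PS) from (PySem.Dict.counter_eq_foldl _).symm]
    rw [PySem.Dict.values_eq_map_keys _ (PySem.Dict.nodup_keys_counter _) 0, PySem.Dict.keys_counter,
        List.map_map]
    have hbody : ((fun n => n * n) ∘ (fun k => (PySem.Dict.counter (pvKeys TS PS)).getD k 0))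
        = fun k => (((pvKeys TS PS).count k : Int)) * (((pvKeys TS PS).count k : Int)) := by
      funext k
      simp [PySem.Dict.getD_counter]
    rw [hbody]
    rw [pvL_sum_sq_extend _ (PySem.Set.nodup_ofList _)
        (((Finset.range TS.length) ×ˢ (Finset.range PS.length)).image
          (fun ji : Nat × Nat => ((ji.1 : Int), (ji.2 : Int))))
        (fun k hk => ?_) (fun k => ((pvKeys TS PS).count k : Int)) (fun k hkG hkn => ?_)]
    · rw [Finset.sum_image (fun a _ b _ h => by
        cases a; cases b
        simpa [Prod.ext_iff, Int.natCast_inj] using h)]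
      rw [Finset.sum_product (Finset.range TS.length) (Finset.range PS.length)
          (fun ji : Nat × Nat => (((pvKeys TS PS).count ((ji.1 : Int), (ji.2 : Int)) : Int))
            * (((pvKeys TS PS).count ((ji.1 : Int), (ji.2 : Int)) : Int)))]
      exact Finset.sum_congr rfl (fun j hj => Finset.sum_congr rfl (fun i hi => by
        rw [hcnt j hj i hi]))
    · have hk' : k ∈ pvKeys TS PS := (PySem.Set.mem_ofList _ _).mp hk
      obtain ⟨j, hj, i, hi, rfl⟩ := hmemg k hk'
      exact Finset.mem_image.mpr ⟨(j, i), Finset.mem_product.mpr ⟨Finset.mem_range.mpr hj, Finset.mem_range.mpr hi⟩, rfl⟩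
    · have : k ∉ pvKeys TS PS := fun hc => hkn ((PySem.Set.mem_ofList _ _).mpr hc)
      simp [List.count_eq_zero_of_not_mem this]
  -- assemble
  have hNint : PySem.List.len (altKeys TS PS) = pvS TS PS := by
    rw [PySem.List.len_eq, pvL_Bkeys, hlen]
    push_cast
    rw [Finset.sum_comm]
    rw [pvS]
    refine Finset.sum_congr rfl (fun i hi => ?_)
    rw [pvRow]
    exact Finset.sum_congr rfl (fun j hj => by rw [hcnt j hj i hi])
  rw [hNint, hrows, hcols, hsq, pvNum, Finset.sum_comm]

-- closed form of A's p_den / r_den arguments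
theorem pvL_den (l : List (List Int)) :
    ((l.map (fun c => PySem.Set.len c)).map (fun a => a * ((l.map (fun c => PySem.Set.len c)).sum - a))).sum
      = (l.map (fun c => PySem.Set.len c)).sum * (l.map (fun c => PySem.Set.len c)).sum
        - (l.map (fun c => PySem.Set.len c * PySem.Set.len c)).sum := by
  rw [pvL_sum_mul_sub]
  congr 1
  rw [List.map_map]
  rfl

-- ===== VERDICT (by name: the statement is the Claim_ definition above) =====
set_option maxHeartbeats 1000000 in
theorem pairwise_negative_slow_spec : Claim_equal_pairwise_negative_slow := by
  unfold Claim_equal_pairwise_negative_slow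
  intro true_ pred _hdom hpre
  unfold Spec_pairwise_negative_slow
  obtain ⟨-, -, htx, hpx⟩ := hpre
  have ht : ∀ c ∈ pyValues true_, c.Nodup := by
    intro c hc
    obtain ⟨kv, hkv, rfl⟩ := List.mem_map.mp hc
    exact htx kv hkv
  have hp : ∀ c ∈ pyValues pred, c.Nodup := by
    intro c hc
    obtain ⟨kv, hkv, rfl⟩ := List.mem_map.mp hc
    exact hpx kv hkv
  show pairwise_negative_slow true_ pred = pairwise_negative_slow_alt true_ pred
  rw [pairwise_negative_slow, pairwise_negative_slow_alt]
  simp only [List.cons.injEq, and_true]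
  refine ⟨?_, ?_, ?_, ?_⟩
  · exact congrArg (fun z => PySem.Int.floordiv z 2)
      ((pvL_A_num (pyValues true_) (pyValues pred) ht hp).trans
        (pvL_B_num (pyValues true_) (pyValues pred) ht).symm)
  · exact congrArg (fun z => PySem.Int.floordiv z 2) (pvL_den (pyValues pred))
  · exact congrArg (fun z => PySem.Int.floordiv z 2)
      ((pvL_A_num (pyValues true_) (pyValues pred) ht hp).trans
        (pvL_B_num (pyValues true_) (pyValues pred) ht).symm)
  · exact congrArg (fun z => PySem.Int.floordiv z 2) (pvL_den (pyValues true_))
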